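-- pv_equiv track=rewrite | github.com/vnpnh/HackerRank | Problem Solving/Algorithm/Breaking the Records.py | breakingRecords
-- ===== SOURCE A (Python) =====
-- def breakingRecords(scores):
--     # Write your code here
--     maxScore = []
--     minScore = []
--     for i in range(len(scores)):
--         if i == 0:
--             maxScore.append(scores[i])
--             minScore.append(scores[i])
--             continue
--
--         if scores[i] > max(maxScore):
--             maxScore.append(scores[i])
--
--         elif scores[i] < min(minScore):
--             minScore.append(scores[i])
--     return [len(maxScore)-1, len(minScore)-1]
-- ===== SOURCE B (Python) =====
-- def breakingRecords(scores):
--     # Single pass: track the running max/min and count how often each is beaten.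
--     hi = lo = scores[0]
--     up = down = 0
--     for v in scores[1:]:
--         if v > hi:
--             hi = v
--             up += 1
--         elif v < lo:
--             lo = v
--             down += 1
--     return [up, down]
-- ===== Notes on version B (the rewrite author's own statement) =====
-- stated objective: faster
-- what changed: B replaces A's record lists with max()/min() recomputed each iteration by a single pass keeping the running max/min and two counters; Pre_ excludes the empty list, where A returns negative counts and B raises.
-- outside the precondition, e.g. on breakingRecords([]): A returns [-1, -1], B raises IndexError
import Mathlib
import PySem

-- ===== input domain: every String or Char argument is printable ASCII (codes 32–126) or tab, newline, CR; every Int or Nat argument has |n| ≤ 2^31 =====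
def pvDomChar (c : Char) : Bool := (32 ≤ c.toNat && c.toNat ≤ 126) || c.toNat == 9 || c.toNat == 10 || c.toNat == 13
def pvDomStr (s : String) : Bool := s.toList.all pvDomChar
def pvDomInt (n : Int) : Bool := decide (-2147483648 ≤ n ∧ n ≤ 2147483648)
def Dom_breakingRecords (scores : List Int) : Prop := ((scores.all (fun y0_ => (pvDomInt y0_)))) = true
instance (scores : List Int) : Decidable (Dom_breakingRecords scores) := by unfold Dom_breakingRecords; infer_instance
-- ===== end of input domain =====

-- B replaces A's quadratic record lists (max()/min() recomputed per step) by a single pass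
-- with running max/min and two counters; Pre_ excludes the empty list (see below).


-- ===== PORT A =====
def breakingRecords (scores : List Int) : List Int :=
  let st := (PySem.List.pyRange 0 (scores.length : Int) 1).foldl
    (fun (st : List Int × List Int) i =>
      if i == 0 then (st.1 ++ [PySem.List.pyGetD scores i 0], st.2 ++ [PySem.List.pyGetD scores i 0])
      else if PySem.List.pyGetD scores i 0 > (PySem.List.max? st.1 (fun y => y)).getD 0 then
        (st.1 ++ [PySem.List.pyGetD scores i 0], st.2)
      else if PySem.List.pyGetD scores i 0 < (PySem.List.min? st.2 (fun y => y)).getD 0 then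
        (st.1, st.2 ++ [PySem.List.pyGetD scores i 0])
      else st) (([], []) : List Int × List Int)
  [(st.1.length : Int) - 1, (st.2.length : Int) - 1]

-- ===== PORT B =====
def brLoop (hi lo up down : Int) : List Int → List Int
  | [] => [up, down]
  | v :: rest =>
    if v > hi then brLoop v lo (up + 1) down rest
    else if v < lo then brLoop hi v up (down + 1) rest
    else brLoop hi lo up down rest

def breakingRecords_alt (scores : List Int) : List Int :=
  match scores with
  | [] => []   -- Python B raises IndexError here; excluded by Pre_
  | s :: rest => brLoop s s 0 0 rest

-- ===== PRECONDITION & SPEC =====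
-- Pre_ excludes the empty list: A still returns a pair of negative counts there, while
-- B's natural first-element access raises IndexError, so no value of B can match it.
def Pre_breakingRecords (scores : List Int) : Prop := scores ≠ []
instance (scores : List Int) : Decidable (Pre_breakingRecords scores) := by unfold Pre_breakingRecords; infer_instance
def pvWitness_breakingRecords : List Int := [3, 4, 2, 4, 1]
def Spec_breakingRecords (scores : List Int) (out : List Int) : Prop := out = breakingRecords_alt scores
instance (scores : List Int) (out : List Int) : Decidable (Spec_breakingRecords scores out) := by unfold Spec_breakingRecords; infer_instance

-- ===== CLAIM (what is proved, stated in full; the proofs are below) =====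
def Claim_equal_breakingRecords : Prop := ∀ (scores : List Int), Dom_breakingRecords scores → Pre_breakingRecords scores → Spec_breakingRecords scores (breakingRecords scores)

-- ===== LEMMAS AND PROOFS =====

theorem max?_append_singleton (xs : List Int) (hi v : Int)
    (h : PySem.List.max? xs (fun y => y) = some hi) :
    PySem.List.max? (xs ++ [v]) (fun y => y) = some (max hi v) := by
  cases xs with
  | nil => simp [PySem.List.max?] at h
  | cons x t =>
    rw [PySem.List.max?_id_cons] at h
    have : (x :: t) ++ [v] = x :: (t ++ [v]) := by simp
    rw [this, PySem.List.max?_id_cons, List.foldl_append]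
    simp_all

theorem min?_append_singleton (xs : List Int) (lo v : Int)
    (h : PySem.List.min? xs (fun y => y) = some lo) :
    PySem.List.min? (xs ++ [v]) (fun y => y) = some (min lo v) := by
  cases xs with
  | nil => simp [PySem.List.min?] at h
  | cons x t =>
    rw [PySem.List.min?_id_cons] at h
    have : (x :: t) ++ [v] = x :: (t ++ [v]) := by simp
    rw [this, PySem.List.min?_id_cons, List.foldl_append]
    simp_all

theorem br_invariant (rest : List Int) :
    ∀ (maxS minS : List Int) (hi lo up down : Int),
    PySem.List.max? maxS (fun y => y) = some hi →
    PySem.List.min? minS (fun y => y) = some lo →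
    (maxS.length : Int) - 1 = up → (minS.length : Int) - 1 = down →
    (let st := rest.foldl
      (fun (st : List Int × List Int) v =>
        if v > (PySem.List.max? st.1 (fun y => y)).getD 0 then (st.1 ++ [v], st.2)
        else if v < (PySem.List.min? st.2 (fun y => y)).getD 0 then (st.1, st.2 ++ [v])
        else st) (maxS, minS)
     [(st.1.length : Int) - 1, (st.2.length : Int) - 1]) = brLoop hi lo up down rest := by
  induction rest with
  | nil => intro maxS minS hi lo up down hmax hmin hup hdown; simp [brLoop, hup, hdown]
  | cons v rest ih =>
    intro maxS minS hi lo up down hmax hmin hup hdown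
    simp only [List.foldl_cons, brLoop, hmax, hmin, Option.getD_some]
    by_cases h1 : v > hi
    · simp only [h1, if_pos]
      have := ih (maxS ++ [v]) minS v lo (up + 1) down
        (by rw [max?_append_singleton maxS hi v hmax]; congr 1; omega)
        hmin (by simp; omega) hdown
      simpa using this
    · simp only [h1, if_false]
      by_cases h2 : v < lo
      · simp only [h2, if_pos]
        have := ih maxS (minS ++ [v]) hi v up (down + 1) hmax
          (by rw [min?_append_singleton minS lo v hmin]; congr 1; omega)
          hup (by simp; omega)
        simpa using this
      · simp only [h2, if_false]
        exact ih maxS minS hi lo up down hmax hmin hup hdown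


-- ===== VERDICT (by name: the statement is the Claim_ definition above) =====
theorem breakingRecords_spec : Claim_equal_breakingRecords := by
  intro scores _ hpre
  unfold Spec_breakingRecords breakingRecords breakingRecords_alt
  cases scores with
  | nil => exact absurd rfl hpre
  | cons s rest =>
    have hlen : (0 : Int) < ((s :: rest).length : Int) := by
      simp only [List.length_cons]; push_cast; omega
    rw [PySem.List.pyRange_one_cons hlen]
    simp only [List.foldl_cons, zero_add]
    have h0 : ((if (0 : Int) == 0 then
          (([] : List Int) ++ [PySem.List.pyGetD (s :: rest) 0 0], ([] : List Int) ++ [PySem.List.pyGetD (s :: rest) 0 0])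
        else if PySem.List.pyGetD (s :: rest) 0 0 > (PySem.List.max? ([] : List Int) (fun y => y)).getD 0 then
          (([] : List Int) ++ [PySem.List.pyGetD (s :: rest) 0 0], ([] : List Int))
        else if PySem.List.pyGetD (s :: rest) 0 0 < (PySem.List.min? ([] : List Int) (fun y => y)).getD 0 then
          (([] : List Int), ([] : List Int) ++ [PySem.List.pyGetD (s :: rest) 0 0])
        else (([] : List Int), ([] : List Int))) : List Int × List Int) = ([s], [s]) := by
      simp [PySem.List.pyGetD_zero_cons]
    rw [h0]
    rw [PySem.List.foldl_congr_mem _ _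
      (fun (st : List Int × List Int) i =>
        (fun (st : List Int × List Int) (v : Int) =>
          if v > (PySem.List.max? st.1 (fun y => y)).getD 0 then (st.1 ++ [v], st.2)
          else if v < (PySem.List.min? st.2 (fun y => y)).getD 0 then (st.1, st.2 ++ [v])
          else st) st (PySem.List.pyGetD (s :: rest) i 0)) _
      (by
        intro acc x hx
        have hx1 : (1 : Int) ≤ x := (PySem.List.mem_pyRange_one.mp hx).1
        have : (x == (0 : Int)) = false := by simp; omega
        simp only [this, Bool.false_eq_true, if_false])]
    rw [PySem.List.foldl_pyRange_pyGetD' (s :: rest) 0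
      (fun (st : List Int × List Int) (v : Int) =>
        if v > (PySem.List.max? st.1 (fun y => y)).getD 0 then (st.1 ++ [v], st.2)
        else if v < (PySem.List.min? st.2 (fun y => y)).getD 0 then (st.1, st.2 ++ [v])
        else st) ([s], [s]) (by omega)]
    simpa using br_invariant rest [s] [s] s s 0 0
      (by rw [PySem.List.max?_id_cons]; rfl)
      (by rw [PySem.List.min?_id_cons]; rfl)
      (by simp) (by simp)
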